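-- pv_equiv track=rewrite | github.com/9u4a/algorithm-study | 프로그래머스/unrated/138476. 귤 고르기/귤 고르기.py | solution
-- ===== SOURCE A (Python) =====
-- from collections import Counter
--
-- def solution(k, tangerine):
--     answer = 0
--     tan = Counter(tangerine)
--
--     for i in sorted(tan.values(), reverse = True):
--         k -= i
--         answer +=1
--         if k <= 0:
--             break
--     return answer
-- ===== SOURCE B (Python) =====
-- from collections import Counter
--
-- def solution(k, tangerine):
--     # counting-sort style: bucket[f] = number of distinct sizes occurring exactly f
--     # times; sweep the frequency levels from the highest down, taking whole levels
--     # (ceil(k/f) groups at most) at once instead of one sorted group at a time.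
--     bucket = Counter(Counter(tangerine).values())
--     answer = 0
--     for f in range(max(bucket, default=0), 0, -1):
--         if f not in bucket:
--             continue
--         take = min(bucket[f], -(-k // f))
--         answer += take
--         k -= take * f
--         if k <= 0:
--             break
--     return answer
-- ===== Notes on version B (the rewrite author's own statement) =====
-- stated objective: alternative
-- what changed: A comparison-sorts all per-size frequencies and subtracts them one group at a time; B never sorts: it builds a frequency-of-frequencies table and sweeps integer frequency levels from the maximum down, taking min(bucket[f], ceil(k/f)) whole groups per level. Pre_ restricts to the problem's natural domain k >= 1 (the statement guarantees 1 <= k); for k <= 0 with a nonempty list A still counts one group because it decrements before testing, an artefact of its loop order, while B naturally takes none.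
-- outside the precondition, e.g. on solution(0, [1]): A returns 1, B returns 0; on solution(-2, [3, 3, 5]): A returns 1, B returns -1
import Mathlib
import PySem

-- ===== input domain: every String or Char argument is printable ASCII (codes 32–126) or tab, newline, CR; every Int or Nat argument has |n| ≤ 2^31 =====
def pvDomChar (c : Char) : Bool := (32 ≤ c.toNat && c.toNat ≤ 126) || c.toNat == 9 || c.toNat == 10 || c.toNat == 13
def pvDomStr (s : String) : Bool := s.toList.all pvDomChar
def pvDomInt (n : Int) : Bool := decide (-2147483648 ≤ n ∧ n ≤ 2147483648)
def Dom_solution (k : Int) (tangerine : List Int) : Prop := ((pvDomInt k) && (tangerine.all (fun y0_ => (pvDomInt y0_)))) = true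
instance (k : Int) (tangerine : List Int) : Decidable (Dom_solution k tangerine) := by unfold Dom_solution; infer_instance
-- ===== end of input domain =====

-- B replaces A's comparison sort of all per-size frequencies by a sort-free counting sweep
-- over a frequency-of-frequencies table, from the highest frequency level down (objective:
-- alternative).

-- ===== PORT A =====
def solutionLoop (vs : List Int) (k answer : Int) : Int :=
  match vs with
  | [] => answer
  | i :: rest =>
    let k := k - i
    let answer := answer + 1
    if k ≤ 0 then answer else solutionLoop rest k answer

def solution (k : Int) (tangerine : List Int) : Int :=
  let tan := PySem.Dict.counter tangerine
  solutionLoop (PySem.List.sorted tan.values (fun x => x) true) k 0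

-- ===== PORT B =====
def altSweep (bucket : PySem.Dict Int Int) (fs : List Int) (k answer : Int) : Int :=
  match fs with
  | [] => answer
  | f :: rest =>
    if bucket.contains f = false then altSweep bucket rest k answer  -- 'if f not in bucket: continue'
    else
      -- bucket[f] is guarded by the membership test just above, so getD is exact here
      let take := min (bucket.getD f 0) (-(PySem.Int.floordiv (-k) f))
      let answer := answer + take
      let k := k - take * f
      if k ≤ 0 then answer else altSweep bucket rest k answer

def solution_alt (k : Int) (tangerine : List Int) : Int :=
  let bucket := PySem.Dict.counter (PySem.Dict.counter tangerine).values
  -- max(bucket, default=0) iterates the dict's keys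
  altSweep bucket
    (PySem.List.pyRange ((PySem.List.max? bucket.keys (fun x => x)).getD 0) 0 (-1)) k 0

-- ===== PRECONDITION & SPEC =====
-- Pre_ restricts to the problem's natural domain k ≥ 1 (the problem statement guarantees
-- 1 ≤ k); for k ≤ 0 with a nonempty list A still counts one group because it decrements
-- before testing, an artefact of its loop order, while B naturally takes none.
def Pre_solution (k : Int) (tangerine : List Int) : Prop := 1 ≤ k
instance (k : Int) (tangerine : List Int) : Decidable (Pre_solution k tangerine) := by unfold Pre_solution; infer_instance
def pvWitness_solution : Int × List Int := (2, [1, 1, 3])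

def Spec_solution (k : Int) (tangerine : List Int) (out : Int) : Prop := out = solution_alt k tangerine
instance (k : Int) (tangerine : List Int) (out : Int) : Decidable (Spec_solution k tangerine out) := by unfold Spec_solution; infer_instance

-- ===== CLAIM (what is proved, stated in full; the proofs are below) =====
def Claim_equal_solution : Prop := ∀ (k : Int) (tangerine : List Int), Dom_solution k tangerine → Pre_solution k tangerine → Spec_solution k tangerine (solution k tangerine)

-- ===== LEMMAS AND PROOFS =====

-- the ceiling division -(-k // f) used by B, bracketed for 0 < f
theorem pvCeil_bounds (a f : Int) (hf : 0 < f) :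
    (-(PySem.Int.floordiv (-a) f) - 1) * f < a ∧ a ≤ -(PySem.Int.floordiv (-a) f) * f :=
  (PySem.Int.neg_floordiv_neg_eq_iff_of_pos hf).mp rfl

-- the ceiling of a positive k by a positive divisor is ≥ 1
theorem pvCeil_pos (k f : Int) (hk : 1 ≤ k) (hf : 1 ≤ f) :
    1 ≤ -(PySem.Int.floordiv (-k) f) := by
  obtain ⟨h1, h2⟩ := pvCeil_bounds k f (by omega)
  set q := -(PySem.Int.floordiv (-k) f)
  by_contra hq
  nlinarith

-- core block lemma: A's loop over one constant block of n copies of f does what one B step does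
theorem pvBlock (n : Nat) (f k a : Int) (rest : List Int) (hk : 1 ≤ k) (hn : 1 ≤ n) (hf : 1 ≤ f) :
    solutionLoop (List.replicate n f ++ rest) k a =
      if k - min (n : Int) (-(PySem.Int.floordiv (-k) f)) * f ≤ 0
      then a + min (n : Int) (-(PySem.Int.floordiv (-k) f))
      else solutionLoop rest (k - n * f) (a + n) := by
  induction n generalizing k a with
  | zero => omega
  | succ m ihm =>
    have hfpos : (0:Int) < f := by omega
    rcases Nat.eq_zero_or_pos m with rfl | hm
    · -- single copy of f
      have hq1 : 1 ≤ -(PySem.Int.floordiv (-k) f) := pvCeil_pos k f hk hf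
      simp only [List.replicate_succ, List.replicate_zero, List.cons_append, List.nil_append,
        solutionLoop]
      push_cast
      rw [min_eq_left hq1, one_mul]
    · -- peel one copy of f, use the induction hypothesis
      by_cases hkf : k - f ≤ 0
      · have hq : -(PySem.Int.floordiv (-k) f) = 1 := by
          refine (PySem.Int.neg_floordiv_neg_eq_iff_of_pos hfpos).mpr ⟨?_, ?_⟩
          · norm_num
            omega
          · rw [one_mul]
            omega
        simp only [List.replicate_succ, List.cons_append, solutionLoop]
        rw [if_pos hkf, hq]
        have hmin1 : min ((m:Int) + 1) 1 = 1 := by omega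
        push_cast
        rw [hmin1, one_mul, if_pos hkf]
      · obtain ⟨h1, h2⟩ := pvCeil_bounds k f hfpos
        set q := -(PySem.Int.floordiv (-k) f) with hqdef
        have hq' : -(PySem.Int.floordiv (-(k - f)) f) = q - 1 := by
          refine (PySem.Int.neg_floordiv_neg_eq_iff_of_pos hfpos).mpr ⟨?_, ?_⟩
          · nlinarith
          · nlinarith
        have hq2 : 2 ≤ q := by nlinarith
        simp only [List.replicate_succ, List.cons_append, solutionLoop]
        rw [if_neg hkf, ihm (k - f) (a + 1) (by omega) hm, hq']
        have hmin : min ((m:Int) + 1) q = min (m:Int) (q - 1) + 1 := by omega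
        push_cast
        rw [hmin]
        set t' := min (m:Int) (q - 1) with ht'
        rw [show k - f - t' * f = k - (t' + 1) * f from by ring,
          show a + 1 + t' = a + (t' + 1) from by ring,
          show k - f - (m:Int) * f = k - ((m:Int) + 1) * f from by ring,
          show a + 1 + (m:Int) = a + ((m:Int) + 1) from by ring]

-- if one B step does not exhaust k, it took the whole bucket
theorem pvTakeAll (n : Nat) (f k : Int) (hf : 1 ≤ f)
    (h : ¬ k - min (n : Int) (-(PySem.Int.floordiv (-k) f)) * f ≤ 0) :
    min (n : Int) (-(PySem.Int.floordiv (-k) f)) = n := by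
  obtain ⟨h1, h2⟩ := pvCeil_bounds k f (by omega)
  set q := -(PySem.Int.floordiv (-k) f)
  rcases le_or_gt (n : Int) q with hle | hlt
  · exact min_eq_left hle
  · exfalso
    apply h
    rw [min_eq_right hlt.le]
    nlinarith

-- counting elements of the flattened block list
theorem pvCountFlat (vs D : List Int) (x : Int) (hD : D.Nodup) :
    (D.flatMap (fun f => List.replicate (vs.count f) f)).count x
      = if x ∈ D then vs.count x else 0 := by
  induction D with
  | nil => simp
  | cons d D ih =>
    obtain ⟨hd, hD'⟩ := List.nodup_cons.mp hD
    rw [List.flatMap_cons, List.count_append, List.count_replicate, ih hD']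
    by_cases hxd : x = d
    · subst hxd
      simp [hd]
    · simp [Ne.symm hxd, hxd, List.mem_cons]

theorem pvPermFlat (vs D : List Int) (hD : D.Nodup) (hmem : ∀ x, x ∈ D ↔ x ∈ vs) :
    (D.flatMap (fun f => List.replicate (vs.count f) f)).Perm vs := by
  refine List.perm_iff_count.mpr (fun x => ?_)
  rw [pvCountFlat vs D x hD]
  by_cases hx : x ∈ vs
  · rw [if_pos ((hmem x).mpr hx)]
  · rw [if_neg (fun h => hx ((hmem x).mp h)), Eq.comm, List.count_eq_zero]
    exact hx

theorem pvPairwiseFlat (vs D : List Int) (hD : D.Pairwise (fun a b => b ≤ a)) :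
    (D.flatMap (fun f => List.replicate (vs.count f) f)).Pairwise (fun a b => b ≤ a) := by
  induction D with
  | nil => simp
  | cons d D ih =>
    obtain ⟨hall, hD'⟩ := List.pairwise_cons.mp hD
    rw [List.flatMap_cons, List.pairwise_append]
    refine ⟨List.pairwise_replicate.mpr (Or.inr le_rfl), ih hD', ?_⟩
    intro p hp q hq
    obtain ⟨g, hg, hq'⟩ := List.mem_flatMap.mp hq
    rw [List.eq_of_mem_replicate hp, List.eq_of_mem_replicate hq']
    exact hall g hg

-- the descending sort of vs is the flattening of its descending distinct values with multiplicities
theorem pvSortedEqFlat (vs : List Int) :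
    PySem.List.sorted vs (fun x => x) true
      = (PySem.List.sorted (PySem.Set.ofList vs) (fun x => x) true).flatMap
          (fun f => List.replicate (vs.count f) f) := by
  set D := PySem.List.sorted (PySem.Set.ofList vs) (fun x => x) true with hDdef
  have hnd : D.Nodup := (PySem.List.sorted_perm _ _ _).symm.nodup (PySem.Set.nodup_ofList vs)
  have hmem : ∀ x, x ∈ D ↔ x ∈ vs := fun x =>
    (PySem.List.mem_sorted _ _ _ _).trans (PySem.Set.mem_ofList vs x)
  refine List.Perm.eq_of_pairwise (le := fun a b => b ≤ a)
    (fun a b _ _ h1 h2 => le_antisymm h2 h1) ?_ ?_ ?_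
  · exact PySem.List.sorted_pairwise_rev vs (fun x => x)
  · exact pvPairwiseFlat vs D (PySem.List.sorted_pairwise_rev _ _)
  · exact ((PySem.List.sorted_perm vs _ _).trans (pvPermFlat vs D hnd hmem).symm)

-- A's loop over the flattened blocks is B's sweep, level by level
theorem pvLoops (vs : List Int) (D : List Int) (k a : Int) (hk : 1 ≤ k)
    (hpos : ∀ f ∈ D, 1 ≤ f) (hmem : ∀ f ∈ D, f ∈ vs) :
    solutionLoop (D.flatMap (fun f => List.replicate (vs.count f) f)) k a
      = altSweep (PySem.Dict.counter vs) D k a := by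
  induction D generalizing k a with
  | nil => rfl
  | cons f D ih =>
    have hf : 1 ≤ f := hpos f List.mem_cons_self
    have hfvs : f ∈ vs := hmem f List.mem_cons_self
    have hn : 1 ≤ vs.count f := List.count_pos_iff.mpr hfvs
    rw [List.flatMap_cons, pvBlock (vs.count f) f k a _ hk hn hf]
    rw [altSweep]
    have hcontains : (PySem.Dict.counter vs).contains f = true := by
      rw [PySem.Dict.contains_counter]
      exact List.contains_iff_mem.mpr hfvs
    simp only [hcontains, Bool.true_eq_false, if_false, PySem.Dict.getD_counter]
    split_ifs with hcond
    · rfl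
    · have hmin := pvTakeAll (vs.count f) f k hf hcond
      rw [hmin] at hcond ⊢
      exact ih _ _ (by omega)
        (fun g hg => hpos g (List.mem_cons_of_mem f hg))
        (fun g hg => hmem g (List.mem_cons_of_mem f hg))

-- skipping absent levels is filtering them out beforehand
theorem pvSkip (bucket : PySem.Dict Int Int) (fs : List Int) (k a : Int) :
    altSweep bucket fs k a = altSweep bucket (fs.filter (fun f => bucket.contains f)) k a := by
  induction fs generalizing k a with
  | nil => rfl
  | cons f rest ih =>
    by_cases hc : bucket.contains f = true
    · rw [List.filter_cons_of_pos hc]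
      rw [altSweep, altSweep]
      simp only [hc, Bool.true_eq_false, if_false]
      split_ifs with h
      · rfl
      · exact ih _ _
    · rw [List.filter_cons_of_neg hc, altSweep]
      simp only [eq_false_of_ne_true hc, if_true]
      exact ih _ _

theorem pvValuesPos (t : List Int) : ∀ x ∈ (PySem.Dict.counter t).values, 1 ≤ x := by
  intro x hx
  simp only [PySem.Dict.values, PySem.Dict.items_counter, List.map_map, List.mem_map,
    Function.comp] at hx
  obtain ⟨f, hf, rfl⟩ := hx
  have hft : f ∈ t := (PySem.Set.mem_ofList t f).mp hf
  have := List.count_pos_iff.mpr hft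
  exact_mod_cast this

-- the countdown range filtered to present levels IS the descending sorted distinct values
theorem pvFilterRange (vs : List Int) (hpos : ∀ x ∈ vs, 1 ≤ x) :
    (PySem.List.pyRange
        ((PySem.List.max? (PySem.Dict.counter vs).keys (fun x => x)).getD 0) 0 (-1)).filter
      (fun f => (PySem.Dict.counter vs).contains f)
      = PySem.List.sorted (PySem.Set.ofList vs) (fun x => x) true := by
  set top := (PySem.List.max? (PySem.Dict.counter vs).keys (fun x => x)).getD 0 with htop
  set L := (PySem.List.pyRange top 0 (-1)).filter (fun f => (PySem.Dict.counter vs).contains f)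
    with hL
  set D := PySem.List.sorted (PySem.Set.ofList vs) (fun x => x) true with hD
  have hmemL : ∀ x, x ∈ L ↔ x ∈ vs := by
    intro x
    rw [hL, List.mem_filter, PySem.List.mem_pyRange_neg_one, PySem.Dict.contains_counter]
    constructor
    · rintro ⟨-, hx⟩
      exact List.contains_iff_mem.mp hx
    · intro hx
      refine ⟨⟨hpos x hx, ?_⟩, List.contains_iff_mem.mpr hx⟩
      have hne : (PySem.Set.ofList vs) ≠ [] := by
        intro h
        have := (PySem.Set.mem_ofList vs x).mpr hx
        rw [h] at this
        exact List.not_mem_nil this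
      obtain ⟨m, hm⟩ : ∃ m, PySem.List.max? (PySem.Dict.counter vs).keys (fun x => x) = some m := by
        cases hmx : PySem.List.max? (PySem.Dict.counter vs).keys (fun x => x) with
        | none =>
          exfalso
          apply hne
          have h0 := (PySem.List.max?_eq_none_iff _ _).mp hmx
          rwa [PySem.Dict.keys_counter] at h0
        | some m => exact ⟨m, rfl⟩
      have hxm := PySem.List.max?_isMax hm x
        (by rw [PySem.Dict.keys_counter]; exact (PySem.Set.mem_ofList vs x).mpr hx)
      rw [htop, hm]
      simpa using hxm
  have hpwL : L.Pairwise (fun a b => (b:Int) ≤ a) := by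
    have : (PySem.List.pyRange top 0 (-1)).Pairwise (fun a b => (b:Int) < a) := by
      rw [PySem.List.pyRange_neg_one_eq_reverse, List.pairwise_reverse]
      exact PySem.List.pairwise_lt_pyRange_one _ _
    exact (this.filter _).imp (fun h => le_of_lt h)
  have hndL : L.Nodup := by
    have : (PySem.List.pyRange top 0 (-1)).Nodup := by
      rw [PySem.List.pyRange_neg_one_eq_reverse, List.nodup_reverse]
      exact List.Pairwise.imp (fun h => ne_of_lt h) (PySem.List.pairwise_lt_pyRange_one _ _)
    exact this.filter _
  have hndD : D.Nodup := (PySem.List.sorted_perm _ _ _).symm.nodup (PySem.Set.nodup_ofList vs)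
  have hmemD : ∀ x, x ∈ D ↔ x ∈ vs := fun x =>
    (PySem.List.mem_sorted _ _ _ _).trans (PySem.Set.mem_ofList vs x)
  refine List.Perm.eq_of_pairwise (le := fun a b => b ≤ a)
    (fun a b _ _ h1 h2 => le_antisymm h2 h1) hpwL (PySem.List.sorted_pairwise_rev _ _) ?_
  exact (List.perm_ext_iff_of_nodup hndL hndD).mpr
    (fun x => (hmemL x).trans (hmemD x).symm)

-- ===== VERDICT (by name: the statement is the Claim_ definition above) =====
theorem solution_spec : Claim_equal_solution := by
  intro k t _ hk
  show solution k t = solution_alt k t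
  show solutionLoop (PySem.List.sorted (PySem.Dict.counter t).values (fun x => x) true) k 0
      = altSweep (PySem.Dict.counter (PySem.Dict.counter t).values)
          (PySem.List.pyRange
            ((PySem.List.max? (PySem.Dict.counter (PySem.Dict.counter t).values).keys
              (fun x => x)).getD 0) 0 (-1)) k 0
  set vs := (PySem.Dict.counter t).values with hvs
  set D := PySem.List.sorted (PySem.Set.ofList vs) (fun x => x) true with hD
  rw [pvSkip, pvFilterRange vs (pvValuesPos t), pvSortedEqFlat vs, pvLoops vs D k 0 hk]
  · intro f hf
    exact pvValuesPos t f (((PySem.List.mem_sorted _ _ _ _).mp hf) |> (PySem.Set.mem_ofList vs f).mp)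
  · intro f hf
    exact (PySem.Set.mem_ofList vs f).mp ((PySem.List.mem_sorted _ _ _ _).mp hf)
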